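-- pv_equiv track=rewrite | github.com/ms1498/DataForGood | data4good/TrafficAccidents/filterData.py | get_weather_category
-- ===== SOURCE A (Python) =====
-- def get_weather_category(weather_description):
--     categories = {
--         'CLEAR': ["clear sky"],
--         'RAIN': ["light rain", "moderate rain", "heavy intensity rain", "very heavy rain",
--                  "extreme rain", "freezing rain"],
--         'SNOW': ["light snow", "snow", "heavy snow"],
--         'CLOUDY/OVERCAST': ["few clouds", "scattered clouds", "broken clouds", "overcast clouds"],
--         'UNKNOWN': [ "dust", "sand"],
--         'FOG/SMOKE/HAZE': ["mist", "smoke", "haze", "fog", "sand"],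
--         'BLOWING SNOW': ["sleet"],
--         'FREEZING RAIN/DRIZZLE': ["freezing rain"],
--         'OTHER': ["volcanic ash", "squalls", "tornado"],
--         'SLEET/HAIL': ["sleet"],
--         'SEVERE CROSS WIND GATE': ["windy",  "thunderstorm", "light thunderstorm", "heavy thunderstorm", "ragged thunderstorm" ],
--         'BLOWING SAND, SOIL, DIRT': ["dust", "sand"]
--     }
--
--     # Iterate through the dictionary and find the category
--     for category, descriptions in categories.items():
--         if weather_description.lower() in [desc.lower() for desc in descriptions]:
--             return category
--
--     return "Category not found"  # Return this if no category matches
-- ===== SOURCE B (Python) =====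
-- # Flat lookup table: lowercased description -> category, with A's first-match
-- # conflicts (dust, sand, sleet, freezing rain) already resolved.
-- _WEATHER_CATEGORY = {
--     "clear sky": "CLEAR",
--     "light rain": "RAIN",
--     "moderate rain": "RAIN",
--     "heavy intensity rain": "RAIN",
--     "very heavy rain": "RAIN",
--     "extreme rain": "RAIN",
--     "freezing rain": "RAIN",
--     "light snow": "SNOW",
--     "snow": "SNOW",
--     "heavy snow": "SNOW",
--     "few clouds": "CLOUDY/OVERCAST",
--     "scattered clouds": "CLOUDY/OVERCAST",
--     "broken clouds": "CLOUDY/OVERCAST",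
--     "overcast clouds": "CLOUDY/OVERCAST",
--     "dust": "UNKNOWN",
--     "sand": "UNKNOWN",
--     "mist": "FOG/SMOKE/HAZE",
--     "smoke": "FOG/SMOKE/HAZE",
--     "haze": "FOG/SMOKE/HAZE",
--     "fog": "FOG/SMOKE/HAZE",
--     "sleet": "BLOWING SNOW",
--     "volcanic ash": "OTHER",
--     "squalls": "OTHER",
--     "tornado": "OTHER",
--     "windy": "SEVERE CROSS WIND GATE",
--     "thunderstorm": "SEVERE CROSS WIND GATE",
--     "light thunderstorm": "SEVERE CROSS WIND GATE",
--     "heavy thunderstorm": "SEVERE CROSS WIND GATE",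
--     "ragged thunderstorm": "SEVERE CROSS WIND GATE",
-- }
--
--
-- def get_weather_category(weather_description):
--     return _WEATHER_CATEGORY.get(weather_description.lower(), "Category not found")
-- ===== Notes on version B (the rewrite author's own statement) =====
-- stated objective: simpler
-- what changed: B replaces A's per-call loop over 12 categories (each lowercasing its description list and doing a membership scan) by one flat literal dict mapping lowered description to category with first-match conflicts (dust, sand, sleet, freezing rain) pre-resolved, answered by a single dict lookup with a default.
import Mathlib
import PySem

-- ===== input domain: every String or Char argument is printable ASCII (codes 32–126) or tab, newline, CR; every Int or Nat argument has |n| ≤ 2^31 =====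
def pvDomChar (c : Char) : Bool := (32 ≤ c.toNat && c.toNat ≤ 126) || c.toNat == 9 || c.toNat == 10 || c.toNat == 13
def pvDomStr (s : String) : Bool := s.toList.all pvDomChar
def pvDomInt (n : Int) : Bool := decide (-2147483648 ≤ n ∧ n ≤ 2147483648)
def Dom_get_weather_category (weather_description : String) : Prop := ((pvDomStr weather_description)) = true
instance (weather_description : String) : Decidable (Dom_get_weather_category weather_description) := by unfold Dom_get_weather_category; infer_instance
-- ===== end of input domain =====

-- B replaces A's per-call scan over every category's freshly lowercased list by one flat
-- literal table (lowered description -> category, first-match conflicts pre-resolved) and a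
-- single lookup (objective: simpler).


-- ===== PORT A =====
-- A's dict literal of categories (distinct keys, insertion order preserved as a list of pairs)
def pvCategoriesA : List (String × List String) :=
  [("CLEAR", ["clear sky"]),
   ("RAIN", ["light rain", "moderate rain", "heavy intensity rain", "very heavy rain",
             "extreme rain", "freezing rain"]),
   ("SNOW", ["light snow", "snow", "heavy snow"]),
   ("CLOUDY/OVERCAST", ["few clouds", "scattered clouds", "broken clouds", "overcast clouds"]),
   ("UNKNOWN", ["dust", "sand"]),
   ("FOG/SMOKE/HAZE", ["mist", "smoke", "haze", "fog", "sand"]),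
   ("BLOWING SNOW", ["sleet"]),
   ("FREEZING RAIN/DRIZZLE", ["freezing rain"]),
   ("OTHER", ["volcanic ash", "squalls", "tornado"]),
   ("SLEET/HAIL", ["sleet"]),
   ("SEVERE CROSS WIND GATE", ["windy", "thunderstorm", "light thunderstorm", "heavy thunderstorm", "ragged thunderstorm"]),
   ("BLOWING SAND, SOIL, DIRT", ["dust", "sand"])]

-- the 'for category, descriptions in categories.items(): if … return category' loop
def pvScanA (wl : String) : List (String × List String) → String
  | [] => "Category not found"
  | (category, descriptions) :: rest =>
      if (descriptions.map PySem.Str.lower).contains wl then category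
      else pvScanA wl rest

def get_weather_category (weather_description : String) : String :=
  pvScanA (PySem.Str.lower weather_description) pvCategoriesA

-- ===== PORT B =====
-- Source B's flat dict literal _WEATHER_CATEGORY (29 distinct keys) as an association list;
-- .get on a literal dict with distinct keys is first-match association-list lookup.
def pvFlatTable : List (String × String) :=
  [("clear sky", "CLEAR"),
   ("light rain", "RAIN"),
   ("moderate rain", "RAIN"),
   ("heavy intensity rain", "RAIN"),
   ("very heavy rain", "RAIN"),
   ("extreme rain", "RAIN"),
   ("freezing rain", "RAIN"),
   ("light snow", "SNOW"),
   ("snow", "SNOW"),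
   ("heavy snow", "SNOW"),
   ("few clouds", "CLOUDY/OVERCAST"),
   ("scattered clouds", "CLOUDY/OVERCAST"),
   ("broken clouds", "CLOUDY/OVERCAST"),
   ("overcast clouds", "CLOUDY/OVERCAST"),
   ("dust", "UNKNOWN"),
   ("sand", "UNKNOWN"),
   ("mist", "FOG/SMOKE/HAZE"),
   ("smoke", "FOG/SMOKE/HAZE"),
   ("haze", "FOG/SMOKE/HAZE"),
   ("fog", "FOG/SMOKE/HAZE"),
   ("sleet", "BLOWING SNOW"),
   ("volcanic ash", "OTHER"),
   ("squalls", "OTHER"),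
   ("tornado", "OTHER"),
   ("windy", "SEVERE CROSS WIND GATE"),
   ("thunderstorm", "SEVERE CROSS WIND GATE"),
   ("light thunderstorm", "SEVERE CROSS WIND GATE"),
   ("heavy thunderstorm", "SEVERE CROSS WIND GATE"),
   ("ragged thunderstorm", "SEVERE CROSS WIND GATE")]

def get_weather_category_alt (weather_description : String) : String :=
  (pvFlatTable.lookup (PySem.Str.lower weather_description)).getD "Category not found"

-- ===== PRECONDITION & SPEC =====
def Spec_get_weather_category (weather_description : String) (out : String) : Prop := out = get_weather_category_alt weather_description
instance (weather_description : String) (out : String) : Decidable (Spec_get_weather_category weather_description out) := by unfold Spec_get_weather_category; infer_instance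

-- ===== CLAIM (what is proved, stated in full; the proofs are below) =====
def Claim_equal_get_weather_category : Prop := ∀ (weather_description : String), Dom_get_weather_category weather_description → Spec_get_weather_category weather_description (get_weather_category weather_description)

-- ===== LEMMAS AND PROOFS =====

-- the flat association list A's scan implicitly walks: (lowered description, category) pairs
def pvFlatten (cats : List (String × List String)) : List (String × String) :=
  cats.flatMap (fun p => p.2.map (fun d => (PySem.Str.lower d, p.1)))

theorem lookup_map_const (s c : String) (ds : List String) :
    (ds.map (fun d => (PySem.Str.lower d, c))).lookup s
      = if (ds.map PySem.Str.lower).contains s then some c else none := by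
  induction ds with
  | nil => rfl
  | cons d rest ih =>
    simp only [List.map_cons, List.lookup, List.contains_cons]
    by_cases h : s = PySem.Str.lower d
    · simp [h]
    · simp [show (s == PySem.Str.lower d) = false by simpa using h, ih]

theorem scanA_eq_lookup_flatten (s : String) (cats : List (String × List String)) :
    pvScanA s cats = ((pvFlatten cats).lookup s).getD "Category not found" := by
  induction cats with
  | nil => rfl
  | cons p rest ih =>
    obtain ⟨c, ds⟩ := p
    simp only [pvScanA, pvFlatten, List.flatMap_cons, List.lookup_append, lookup_map_const]
    split
    · simp
    · simpa [pvFlatten] using ih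

-- drop every later duplicate of a key, keeping the first occurrence
def pvDedup (seen : List String) : List (String × String) → List (String × String)
  | [] => []
  | (k, v) :: t => if seen.contains k then pvDedup seen t else (k, v) :: pvDedup (k :: seen) t

theorem lookup_pvDedup (s : String) (l : List (String × String)) :
    ∀ seen : List String, seen.contains s = false →
      (pvDedup seen l).lookup s = l.lookup s := by
  induction l with
  | nil => intro seen _; rfl
  | cons p t ih =>
    intro seen hs
    obtain ⟨k, v⟩ := p
    by_cases hk : seen.contains k
    · have hsk : s ≠ k := by intro h; rw [h, hk] at hs; exact Bool.noConfusion hs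
      simp only [pvDedup, hk, if_true, List.lookup,
                 show (s == k) = false by simpa using hsk]
      exact ih seen hs
    · have hk' : seen.contains k = false := by simpa using hk
      simp only [pvDedup, hk', Bool.false_eq_true, if_false, List.lookup]
      by_cases hsk : s = k
      · simp [hsk]
      · simp only [show (s == k) = false by simpa using hsk]
        exact ih (k :: seen) (by simp; exact ⟨hsk, by simpa using hs⟩)

theorem dedup_flatten_eq : pvDedup [] (pvFlatten pvCategoriesA) = pvFlatTable := by decide

-- ===== VERDICT (by name: the statement is the Claim_ definition above) =====
theorem get_weather_category_spec : Claim_equal_get_weather_category := by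
  intro w _
  unfold Spec_get_weather_category get_weather_category get_weather_category_alt
  rw [scanA_eq_lookup_flatten, ← dedup_flatten_eq, lookup_pvDedup _ _ [] rfl]
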